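-- pv_equiv track=rewrite | github.com/Sharad2001/Data-structures-and-algorithms | bitwise_and_of_the_array.py | count
-- ===== SOURCE A (Python) =====
-- def count(N, A, X):
--     # code here
--     ans = N
--     for i in range(max(A).bit_length()):
--         check = 1 << i
--         if check & X:
--             continue
--         if check < X:
--             check = X - (X%check) + check
--         count = sum(1 for b in A if b & check != check)
--         ans = min(ans, count)
--     return ans
-- ===== SOURCE B (Python) =====
-- def count(N, A, X):
--     # Per-element algorithm: each b contributes a "coverage word" s whose bit i is set
--     # exactly when b & mask_i == mask_i for A's candidate mask_i; bit i of s is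
--     # b's bit i, restricted to positions where X's bit is clear and (for X > 0)
--     # to positions i >= (X & ~b).bit_length() - 1, which encodes the high-part
--     # superset condition of the adjusted mask.  The answer is then
--     # min(N, len(A) - max coverage count over the valid positions).
--     L = max(A).bit_length()
--     valid = ~X & ((1 << L) - 1)
--     if valid == 0:
--         return N
--     covers = []
--     for b in A:
--         s = b & valid
--         if X > 0:
--             t = (X & ~b).bit_length()
--             if t:
--                 s &= -1 << (t - 1)
--         covers.append(s)
--     best = max(sum((s >> i) & 1 for s in covers) for i in range(L) if (valid >> i) & 1)
--     return min(N, len(A) - best)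
-- ===== Notes on version B (the rewrite author's own statement) =====
-- stated objective: alternative
-- what changed: B never builds or tests A's per-bit candidate masks: for each element it computes one coverage word by bit tricks (b & ~X masked from the threshold (X & ~b).bit_length() - 1 up, which encodes the adjusted mask's high-part condition), then returns min(N, len(A) - max per-bit popcount of those words); like A it raises on empty A, which Pre_ excludes.
import Mathlib
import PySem

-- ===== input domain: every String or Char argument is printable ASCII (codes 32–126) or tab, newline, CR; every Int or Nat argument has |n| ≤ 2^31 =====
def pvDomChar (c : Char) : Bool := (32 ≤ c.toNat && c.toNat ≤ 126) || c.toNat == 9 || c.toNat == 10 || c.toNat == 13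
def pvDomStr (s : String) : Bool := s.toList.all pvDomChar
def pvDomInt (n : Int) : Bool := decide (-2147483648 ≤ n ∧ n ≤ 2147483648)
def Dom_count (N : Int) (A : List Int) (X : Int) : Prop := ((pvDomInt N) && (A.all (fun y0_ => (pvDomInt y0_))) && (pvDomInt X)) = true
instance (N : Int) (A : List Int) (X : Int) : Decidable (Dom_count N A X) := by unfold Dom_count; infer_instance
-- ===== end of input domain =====

-- B replaces A's per-bit candidate-mask counting by a per-element bit-trick coverage
-- word plus min(N, len(A) - max per-bit popcount); proved equal on nonempty A (alternative, not faster).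

-- ===== PORT A =====
-- max(A) raises ValueError on A = []; Pre_count excludes it (the .getD 0 is unreachable)
def count (N : Int) (A : List Int) (X : Int) : Int :=
  (List.range (PySem.Int.bitLength ((PySem.List.max? A (fun y => y)).getD 0))).foldl
    (fun ans (i : Nat) =>
      let check : Int := (1 : Int) <<< i
      if PySem.Int.band check X ≠ 0 then ans
      else
        let check := if check < X then X - PySem.Int.mod X check + check else check
        min ans (A.foldl (fun c b => if PySem.Int.band b check ≠ check then c + 1 else c) 0))
    N
-- ===== PORT B =====
-- max(A) raises ValueError on A = []; Pre_count excludes it (the .getD 0 is unreachable);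
-- the .getD 0 after max? over cands is unreachable since valid ≠ 0 there
def count_alt (N : Int) (A : List Int) (X : Int) : Int :=
  let L : Nat := PySem.Int.bitLength ((PySem.List.max? A (fun y => y)).getD 0)
  let valid : Int := PySem.Int.band (Int.not X) ((1 : Int) <<< L - 1)
  if valid = 0 then N
  else
    let covers : List Int := A.foldl (fun cs b =>
      let s := PySem.Int.band b valid
      let s := if 0 < X then
          let t := PySem.Int.bitLength (PySem.Int.band X (Int.not b))
          if t ≠ 0 then PySem.Int.band s ((-1 : Int) <<< (t - 1)) else s
        else s
      cs ++ [s]) []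
    let cands : List Int := (List.range L).filterMap (fun (i : Nat) =>
      if PySem.Int.band (valid >>> i) (1 : Int) ≠ 0 then
        some (covers.foldl (fun acc (s : Int) => acc + PySem.Int.band (s >>> i) (1 : Int)) 0)
      else none)
    let best : Int := (PySem.List.max? cands (fun y => y)).getD 0
    min N (PySem.List.len A - best)


-- ===== PRECONDITION & SPEC =====
-- Pre_ excludes the empty list, on which both A and B raise ValueError at max(A).
def Pre_count (N : Int) (A : List Int) (X : Int) : Prop := A ≠ []
instance (N : Int) (A : List Int) (X : Int) : Decidable (Pre_count N A X) := by unfold Pre_count; infer_instance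
def pvWitness_count : Int × List Int × Int := (3, [5, 2, 7], 4)
def Spec_count (N : Int) (A : List Int) (X : Int) (out : Int) : Prop := out = count_alt N A X
instance (N : Int) (A : List Int) (X : Int) (out : Int) : Decidable (Spec_count N A X out) := by unfold Spec_count; infer_instance

-- ===== CLAIM (what is proved, stated in full; the proofs are below) =====
def Claim_equal_count : Prop := ∀ (N : Int) (A : List Int) (X : Int), Dom_count N A X → Pre_count N A X → Spec_count N A X (count N A X)

-- ===== LEMMAS AND PROOFS =====

lemma and_div_two (x c : Nat) : (x &&& c) / 2 = (x / 2) &&& (c / 2) := by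
  have h : ∀ n : Nat, n / 2 = n >>> 1 := by
    intro n; rw [Nat.shiftRight_eq_div_pow, pow_one]
  rw [h, h, h]
  apply Nat.eq_of_testBit_eq
  intro j
  simp [Nat.testBit_shiftRight, Nat.testBit_and]

lemma mod_two_testBit (x : Nat) : x % 2 = if x.testBit 0 then 1 else 0 := by
  rw [Nat.testBit_zero]
  rcases Nat.mod_two_eq_zero_or_one x with h | h <;> simp [h]

lemma sub_and_testBit : ∀ (x c i : Nat), (x - (x &&& c)).testBit i = (x.testBit i && !(c.testBit i)) := by
  intro x
  induction x using Nat.strong_induction_on with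
  | _ x ih =>
    intro c i
    rcases Nat.eq_zero_or_pos x with hx | hx
    · subst hx; simp
    · have hdiv := and_div_two x c
      have hmod2 : (x &&& c) % 2 = x % 2 * (c % 2) := by
        rw [mod_two_testBit (x &&& c), Nat.testBit_and, mod_two_testBit x, mod_two_testBit c]
        cases x.testBit 0 <;> cases c.testBit 0 <;> simp
      have hle2 : (x / 2) &&& (c / 2) ≤ x / 2 := Nat.and_le_left
      have h1 := Nat.div_add_mod x 2
      have h2 := Nat.div_add_mod (x &&& c) 2
      have hmle : (x &&& c) % 2 ≤ x % 2 := by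
        rcases Nat.mod_two_eq_zero_or_one c with h' | h' <;> rw [hmod2, h'] <;> omega
      have hdecomp : x - (x &&& c) = 2 * (x / 2 - (x / 2 &&& c / 2)) + (x % 2 - (x &&& c) % 2) := by
        omega
      cases i with
      | zero =>
        rw [hdecomp]
        simp only [Nat.testBit_zero]
        have hr : (2 * (x / 2 - (x / 2 &&& c / 2)) + (x % 2 - (x &&& c) % 2)) % 2 = x % 2 - (x &&& c) % 2 := by
          omega
        rw [hr]
        rcases Nat.mod_two_eq_zero_or_one x with h | h <;>
          rcases Nat.mod_two_eq_zero_or_one c with h' | h' <;> simp [h, h', hmod2]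
      | succ j =>
        rw [hdecomp, Nat.testBit_succ]
        have hq : (2 * (x / 2 - (x / 2 &&& c / 2)) + (x % 2 - (x &&& c) % 2)) / 2 = x / 2 - (x / 2 &&& c / 2) := by
          omega
        rw [hq, ih (x / 2) (by omega) (c / 2) j, Nat.testBit_succ x, Nat.testBit_succ c]

lemma eq_zero_iff_testBit (v : Nat) : v = 0 ↔ ∀ j, v.testBit j = false := by
  constructor
  · rintro rfl j; exact Nat.zero_testBit j
  · intro h; exact Nat.eq_of_testBit_eq fun j => by rw [h j, Nat.zero_testBit]

lemma lt_two_pow_iff_testBit (D k : Nat) : D < 2 ^ k ↔ ∀ j, k ≤ j → D.testBit j = false := by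
  constructor
  · intro h j hj
    exact Nat.testBit_lt_two_pow (lt_of_lt_of_le h (Nat.pow_le_pow_right (by norm_num) hj))
  · intro h
    have : D = D % 2 ^ k := by
      apply Nat.eq_of_testBit_eq
      intro j
      rw [Nat.testBit_mod_two_pow]
      by_cases hj : j < k
      · simp [hj]
      · simp [hj, h j (by omega)]
    rw [this]
    exact Nat.mod_lt _ (Nat.two_pow_pos k)

def pbit (n : Int) (i : Nat) : Bool := if 0 ≤ n then n.toNat.testBit i else !((-n - 1).toNat.testBit i)

lemma int_not_eq (n : Int) : Int.not n = -n - 1 := by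
  cases n with
  | ofNat m => show Int.negSucc m = _ ; rw [Int.negSucc_eq, Int.ofNat_eq_natCast]; ring
  | negSucc m => show (m : Int) = _ ; rw [Int.negSucc_eq]; ring

lemma pbit_not (n : Int) (i : Nat) : pbit (Int.not n) i = !pbit n i := by
  rw [int_not_eq]
  by_cases h : 0 ≤ n
  · have h1 : ¬ (0 : Int) ≤ -n - 1 := by omega
    have h2 : -(-n - 1) - 1 = n := by ring
    simp only [pbit, if_neg h1, if_pos h, h2]
  · have h1 : (0 : Int) ≤ -n - 1 := by omega
    simp only [pbit, if_pos h1, if_neg h, Bool.not_not]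

lemma band_toNat_testBit (a b : Int) (h : 0 ≤ a) (i : Nat) :
    (PySem.Int.band a b).toNat.testBit i = (a.toNat.testBit i && pbit b i) := by
  unfold PySem.Int.band
  rw [if_pos h]
  by_cases hb : 0 ≤ b
  · rw [if_pos hb, Int.toNat_natCast, Nat.testBit_and]
    simp [pbit, hb]
  · rw [if_neg hb, Int.toNat_natCast, sub_and_testBit]
    simp [pbit, hb]

lemma band_eq_iff_superset (M : Nat) (b : Int) :
    PySem.Int.band b (M : Int) = (M : Int) ↔ ∀ j, M.testBit j = true → pbit b j = true := by
  rw [PySem.Int.band_comm]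
  have h0 : (0 : Int) ≤ (M : Int) := by positivity
  have hnn := PySem.Int.band_nonneg_of_nonneg_left b h0
  rw [← Int.toNat_of_nonneg hnn, Int.natCast_inj]
  constructor
  · intro hEq j hj
    have := congrArg (fun v => v.testBit j) hEq
    simp only at this
    rw [band_toNat_testBit _ _ h0, Int.toNat_natCast, hj] at this
    simpa using this
  · intro hall
    apply Nat.eq_of_testBit_eq
    intro j
    rw [band_toNat_testBit _ _ h0, Int.toNat_natCast]
    cases hMj : M.testBit j
    · simp
    · simp [hall j hMj]

lemma one_shl_cast (i : Nat) : ((1 : Int) <<< i) = ((2 ^ i : Nat) : Int) := by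
  rw [Int.shiftLeft_eq]; push_cast; ring

lemma skip_test (X : Int) (i : Nat) : (PySem.Int.band ((1 : Int) <<< i) X = 0) ↔ pbit X i = false := by
  rw [one_shl_cast]
  have h0 : (0 : Int) ≤ ((2 ^ i : Nat) : Int) := by positivity
  have hnn := PySem.Int.band_nonneg_of_nonneg_left X h0
  rw [← Int.toNat_of_nonneg hnn]
  rw [show ((((PySem.Int.band ((2 ^ i : Nat) : Int) X).toNat : Int) = 0) ↔ (PySem.Int.band ((2 ^ i : Nat) : Int) X).toNat = 0) from by omega]
  rw [eq_zero_iff_testBit]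
  constructor
  · intro h
    have := h i
    rw [band_toNat_testBit _ _ h0, Int.toNat_natCast, Nat.testBit_two_pow] at this
    simpa using this
  · intro h j
    rw [band_toNat_testBit _ _ h0, Int.toNat_natCast, Nat.testBit_two_pow]
    by_cases hij : i = j
    · subst hij; simp [h]
    · simp [hij]

lemma natCast_shiftRight (v i : Nat) : ((v : Int) >>> i) = ((v >>> i : Nat) : Int) := by
  rw [Int.shiftRight_eq_div_pow, Nat.shiftRight_eq_div_pow]
  exact_mod_cast (Int.ofNat_ediv_ofNat (a := v) (b := 2 ^ i)).symm

lemma bitLength_le_iff (D k : Nat) : PySem.Int.bitLength (D : Int) ≤ k ↔ D < 2 ^ k := by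
  have h1 := PySem.Int.lt_two_pow_bitLength (D : Int)
  rw [Int.natAbs_natCast] at h1
  constructor
  · intro h
    exact lt_of_lt_of_le h1 (Nat.pow_le_pow_right (by norm_num) h)
  · intro h
    by_contra hk
    push Not at hk
    have hD0 : D ≠ 0 := by
      intro h0; subst h0
      rw [show ((0:Nat):Int) = (0:Int) from rfl, PySem.Int.bitLength_zero] at hk
      omega
    have h2 := PySem.Int.two_pow_bitLength_le (D : Int) (by exact_mod_cast hD0)
    rw [Int.natAbs_natCast] at h2
    have : 2 ^ k ≤ 2 ^ (PySem.Int.bitLength (D : Int) - 1) := Nat.pow_le_pow_right (by norm_num) (by omega)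
    omega

def mA (X : Int) (i : Nat) : Int :=
  if (1 : Int) <<< i < X then X - PySem.Int.mod X ((1 : Int) <<< i) + (1 : Int) <<< i else (1 : Int) <<< i

def Cov (X b : Int) (i : Nat) : Prop :=
  pbit b i = true ∧ (0 < X → ∀ j, i < j → pbit X j = true → pbit b j = true)

lemma valid_nonneg (X : Int) (L : Nat) : 0 ≤ PySem.Int.band (Int.not X) ((1 : Int) <<< L - 1) := by
  rw [PySem.Int.band_comm]
  apply PySem.Int.band_nonneg_of_nonneg_left
  rw [one_shl_cast]
  have : (1 : Int) ≤ ((2 ^ L : Nat) : Int) := by exact_mod_cast Nat.one_le_two_pow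
  omega

lemma shl_sub_one_cast (L : Nat) : ((1 : Int) <<< L - 1) = ((2 ^ L - 1 : Nat) : Int) := by
  rw [one_shl_cast]
  have : (1 : Nat) ≤ 2 ^ L := Nat.one_le_two_pow
  push_cast [this]
  ring

lemma valid_testBit (X : Int) (L : Nat) (j : Nat) :
    (PySem.Int.band (Int.not X) ((1 : Int) <<< L - 1)).toNat.testBit j = (decide (j < L) && !pbit X j) := by
  rw [PySem.Int.band_comm, shl_sub_one_cast, band_toNat_testBit _ _ (by positivity), Int.toNat_natCast,
    Nat.testBit_two_pow_sub_one, pbit_not]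

lemma pbit_nonneg {n : Int} (h : 0 ≤ n) (i : Nat) : pbit n i = n.toNat.testBit i := by
  simp [pbit, h]

lemma covA_iff (X b : Int) (i : Nat) (hXi : pbit X i = false) :
    PySem.Int.band b (mA X i) = mA X i ↔ Cov X b i := by
  unfold mA
  by_cases hc : (1 : Int) <<< i < X
  · -- adjusted mask: 2^i < X, in particular 0 < X
    rw [if_pos hc]
    have h2i : ((1 : Int) <<< i) = ((2 ^ i : Nat) : Int) := one_shl_cast i
    have hXpos : 0 < X := by
      have : (0 : Int) < (1 : Int) <<< i := by rw [h2i]; positivity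
      omega
    have hXnn : (0 : Int) ≤ X := le_of_lt hXpos
    -- the adjusted mask as a natural number
    have hmodeq : PySem.Int.mod X ((1 : Int) <<< i) = X % ((2 ^ i : Nat) : Int) := by
      rw [h2i]; exact PySem.Int.mod_eq_emod_of_pos (by positivity)
    have hbit0 : (X.toNat / 2 ^ i) % 2 = 0 := by
      have h1 : X.toNat.testBit i = false := by rw [← pbit_nonneg hXnn]; exact hXi
      rw [show X.toNat.testBit i = (X.toNat / 2 ^ i).testBit 0 from by
        rw [Nat.testBit_div_two_pow, Nat.zero_add]] at h1
      rw [Nat.testBit_zero] at h1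
      simpa using h1
    have hdiv2 : X.toNat / 2 ^ i = 2 * (X.toNat / 2 ^ (i + 1)) := by
      have : X.toNat / 2 ^ (i + 1) = (X.toNat / 2 ^ i) / 2 := by
        rw [Nat.div_div_eq_div_mul, ← pow_succ]
      omega
    have hM : X - PySem.Int.mod X ((1 : Int) <<< i) + (1 : Int) <<< i
        = ((2 ^ (i + 1) * (X.toNat / 2 ^ (i + 1)) + 2 ^ i : Nat) : Int) := by
      rw [hmodeq, h2i]
      have hdivcast : X / ((2 ^ i : Nat) : Int) = ((X.toNat / 2 ^ i : Nat) : Int) := by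
        conv_lhs => rw [← Int.toNat_of_nonneg hXnn]
        exact_mod_cast (Int.ofNat_ediv_ofNat (a := X.toNat) (b := 2 ^ i)).symm
      have hq : X / ((2 ^ i : Nat) : Int) = 2 * ((X.toNat / 2 ^ (i + 1) : Nat) : Int) := by
        rw [hdivcast, hdiv2]; push_cast; ring
      have hdm := Int.emod_add_ediv X ((2 ^ i : Nat) : Int)
      rw [hq] at hdm
      have hRHS : ((2 ^ (i + 1) * (X.toNat / 2 ^ (i + 1)) + 2 ^ i : Nat) : Int)
          = 2 * ((2 ^ i : Nat) : Int) * ((X.toNat / 2 ^ (i + 1) : Nat) : Int) + ((2 ^ i : Nat) : Int) := by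
        push_cast [pow_succ]; ring
      rw [hRHS]
      linarith [hdm]
    rw [hM, band_eq_iff_superset]
    have hMbit : ∀ j, (2 ^ (i + 1) * (X.toNat / 2 ^ (i + 1)) + 2 ^ i).testBit j
        = if j < i + 1 then decide (i = j) else X.toNat.testBit j := by
      intro j
      rw [Nat.testBit_two_pow_mul_add _ (Nat.pow_lt_pow_right (by norm_num) (by omega)) j]
      by_cases hj : j < i + 1
      · simp [hj, Nat.testBit_two_pow]
      · simp only [if_neg hj]
        rw [Nat.testBit_div_two_pow]
        congr 1
        omega
    constructor
    · intro h
      constructor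
      · apply h i
        rw [hMbit i]
        simp
      · intro _ j hij hXj
        apply h j
        rw [hMbit j, if_neg (by omega)]
        rw [pbit_nonneg hXnn] at hXj
        exact hXj
    · rintro ⟨hbi, hrest⟩ j hMj
      rw [hMbit j] at hMj
      by_cases hj : j < i + 1
      · rw [if_pos hj] at hMj
        have : i = j := by simpa using hMj
        subst this; exact hbi
      · rw [if_neg hj] at hMj
        exact hrest hXpos j (by omega) (by rw [pbit_nonneg hXnn]; exact hMj)
  · -- plain mask 2^i (X ≤ 2^i)
    rw [if_neg hc, one_shl_cast, band_eq_iff_superset]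
    have hvac : 0 < X → ∀ j, i < j → pbit X j = true → pbit b j = true := by
      intro hXpos j hij hXj
      exfalso
      have hXnn : (0 : Int) ≤ X := le_of_lt hXpos
      have hXlt : X.toNat < 2 ^ i := by
        have h1 : X ≤ (1 : Int) <<< i := by omega
        rw [one_shl_cast] at h1
        have h2 : X.toNat ≤ 2 ^ i := by omega
        rcases Nat.lt_or_ge X.toNat (2 ^ i) with h | h
        · exact h
        · exfalso
          have : X.toNat = 2 ^ i := by omega
          have : X.toNat.testBit i = true := by rw [this]; simp
          rw [← pbit_nonneg hXnn] at this
          rw [hXi] at this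
          exact Bool.false_ne_true this
      rw [pbit_nonneg hXnn] at hXj
      have : X.toNat.testBit j = false :=
        Nat.testBit_lt_two_pow (lt_of_lt_of_le hXlt (Nat.pow_le_pow_right (by norm_num) (by omega)))
      rw [this] at hXj
      exact Bool.false_ne_true hXj
    unfold Cov
    constructor
    · intro h
      refine ⟨h i (by simp), hvac⟩
    · rintro ⟨hbi, _⟩ j hj
      rw [Nat.testBit_two_pow] at hj
      have : i = j := by simpa using hj
      subst this; exact hbi

def sB (X valid b : Int) : Int :=
  let s := PySem.Int.band b valid
  if 0 < X then
    let t := PySem.Int.bitLength (PySem.Int.band X (Int.not b))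
    if t ≠ 0 then PySem.Int.band s ((-1 : Int) <<< (t - 1)) else s
  else s

lemma band_valid_nonneg (X : Int) (L : Nat) (b : Int) :
    0 ≤ PySem.Int.band b (PySem.Int.band (Int.not X) ((1 : Int) <<< L - 1)) := by
  rw [PySem.Int.band_comm]
  exact PySem.Int.band_nonneg_of_nonneg_left b (valid_nonneg X L)

lemma sB_nonneg (X : Int) (L : Nat) (b : Int) :
    0 ≤ sB X (PySem.Int.band (Int.not X) ((1 : Int) <<< L - 1)) b := by
  simp only [sB]
  split_ifs with h1 h2
  · exact PySem.Int.band_nonneg_of_nonneg_left _ (band_valid_nonneg X L b)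
  · exact band_valid_nonneg X L b
  · exact band_valid_nonneg X L b

lemma neg_one_shl_pbit (t : Nat) (_ht : t ≠ 0) (i : Nat) :
    pbit ((-1 : Int) <<< (t - 1)) i = decide (t - 1 ≤ i) := by
  have hval : ((-1 : Int) <<< (t - 1)) = -(((2 ^ (t - 1) : Nat) : Int)) := by
    rw [Int.shiftLeft_eq]; push_cast; ring
  rw [hval]
  have hpos : (1 : Int) ≤ ((2 ^ (t - 1) : Nat) : Int) := by exact_mod_cast Nat.one_le_two_pow
  have hneg : ¬ (0 : Int) ≤ -(((2 ^ (t - 1) : Nat) : Int)) := by omega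
  rw [pbit, if_neg hneg]
  have harg : - -(((2 ^ (t - 1) : Nat) : Int)) - 1 = ((2 ^ (t - 1) - 1 : Nat) : Int) := by
    have h1 : (1 : Nat) ≤ 2 ^ (t - 1) := Nat.one_le_two_pow
    push_cast [h1]
    ring
  rw [harg, Int.toNat_natCast, Nat.testBit_two_pow_sub_one]
  by_cases h : i < t - 1 <;> simp [h] <;> omega

lemma sB_testBit (X : Int) (L : Nat) (b : Int) (i : Nat) (hi : i < L) (hXi : pbit X i = false) :
    ((sB X (PySem.Int.band (Int.not X) ((1 : Int) <<< L - 1)) b).toNat.testBit i = true) ↔ Cov X b i := by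
  have hs0 : ∀ j, (PySem.Int.band b (PySem.Int.band (Int.not X) ((1 : Int) <<< L - 1))).toNat.testBit j
      = (decide (j < L) && !pbit X j && pbit b j) := by
    intro j
    rw [PySem.Int.band_comm, band_toNat_testBit _ _ (valid_nonneg X L), valid_testBit]
  have hs0i : (PySem.Int.band b (PySem.Int.band (Int.not X) ((1 : Int) <<< L - 1))).toNat.testBit i
      = pbit b i := by
    rw [hs0 i, hXi]
    simp [hi]
  simp only [sB]
  by_cases hX : 0 < X
  · have hXnn : (0 : Int) ≤ X := le_of_lt hX
    have hdnn : 0 ≤ PySem.Int.band X (Int.not b) := PySem.Int.band_nonneg_of_nonneg_left _ hXnn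
    set D : Nat := (PySem.Int.band X (Int.not b)).toNat with hD
    have hDcast : PySem.Int.band X (Int.not b) = (D : Int) := (Int.toNat_of_nonneg hdnn).symm
    have hDbit : ∀ j, D.testBit j = (X.toNat.testBit j && !pbit b j) := by
      intro j
      rw [hD, band_toNat_testBit _ _ hXnn, pbit_not]
    have hcond : ∀ k, (D < 2 ^ k ↔ (∀ j, k ≤ j → pbit X j = true → pbit b j = true)) := by
      intro k
      rw [lt_two_pow_iff_testBit]
      constructor
      · intro h j hj hXj
        have := h j hj
        rw [hDbit j] at this
        rw [pbit_nonneg hXnn] at hXj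
        rw [hXj] at this
        simpa using this
      · intro h j hj
        rw [hDbit j]
        cases hXj : X.toNat.testBit j
        · simp
        · rw [h j hj (by rw [pbit_nonneg hXnn]; exact hXj)]
          simp
    rw [if_pos hX]
    by_cases ht : PySem.Int.bitLength (PySem.Int.band X (Int.not b)) ≠ 0
    · rw [if_pos ht]
      set t := PySem.Int.bitLength (PySem.Int.band X (Int.not b)) with htdef
      rw [band_toNat_testBit _ _ (band_valid_nonneg X L b), hs0i, neg_one_shl_pbit t ht]
      have hiff : (t - 1 ≤ i) ↔ (∀ j, i < j → pbit X j = true → pbit b j = true) := by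
        rw [show ((t - 1 ≤ i) ↔ t ≤ i + 1) from by omega]
        rw [htdef, hDcast, bitLength_le_iff]
        rw [hcond (i + 1)]
        constructor
        · intro h j hj; exact h j (by omega)
        · intro h j hj; exact h j (by omega)
      unfold Cov
      cases hbi : pbit b i
      · simp
      · simp only [Bool.true_and, decide_eq_true_eq, true_and]
        rw [hiff]
        constructor
        · intro h _; exact h
        · intro h; exact h hX
    · rw [if_neg ht]
      push Not at ht
      rw [hDcast] at ht
      have hD0 : D = 0 := by
        have := (bitLength_le_iff D 0).mp (by omega)
        simpa using this
      have hvac : ∀ j, i < j → pbit X j = true → pbit b j = true := by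
        have := (hcond (i + 1)).mp (by rw [hD0]; positivity)
        intro j hj; exact this j (by omega)
      rw [hs0i]
      unfold Cov
      constructor
      · intro h; exact ⟨h, fun _ => hvac⟩
      · rintro ⟨h, _⟩; exact h
  · rw [if_neg hX, hs0i]
    unfold Cov
    constructor
    · intro h; exact ⟨h, fun hc => absurd hc hX⟩
    · rintro ⟨h, _⟩; exact h

lemma band_shr_one (s : Int) (h : 0 ≤ s) (i : Nat) :
    PySem.Int.band (s >>> i) 1 = if s.toNat.testBit i then 1 else 0 := by
  conv_lhs => rw [← Int.toNat_of_nonneg h]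
  rw [natCast_shiftRight, show (1 : Int) = ((1 : Nat) : Int) from rfl, PySem.Int.band_natCast]
  have hval : (s.toNat >>> i) &&& 1 = if s.toNat.testBit i then 1 else 0 := by
    rw [Nat.and_one_is_mod, Nat.shiftRight_eq_div_pow]
    rw [show s.toNat.testBit i = (s.toNat / 2 ^ i).testBit 0 from by
      rw [Nat.testBit_div_two_pow, Nat.zero_add]]
    exact mod_two_testBit _
  rw [hval]
  split <;> simp

lemma transpose_min (P : Nat → Prop) [DecidablePred P] (g : Nat → Int) :
    ∀ (l : List Nat) (a : Int),
      l.foldl (fun ans i => if P i then ans else min ans (g i)) a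
        = (l.filterMap (fun i => if P i then none else some (g i))).foldl min a := by
  intro l
  induction l with
  | nil => intro a; rfl
  | cons i l ih =>
    intro a
    by_cases h : P i <;> simp [h, ih]

lemma foldl_all_skip (P : Nat → Prop) [DecidablePred P] (g : Nat → Int) (l : List Nat) (a : Int)
    (h : ∀ i ∈ l, P i) :
    l.foldl (fun ans i => if P i then ans else min ans (g i)) a = a := by
  rw [transpose_min]
  have : l.filterMap (fun i => if P i then none else some (g i)) = [] := by
    rw [List.filterMap_eq_nil_iff]
    intro i hi
    rw [if_pos (h i hi)]
  rw [this]
  rfl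

lemma filterMap_rel (P Q : Nat → Prop) [DecidablePred P] [DecidablePred Q]
    (gA gB : Nat → Int) (K : Int) :
    ∀ (l : List Nat), (∀ i ∈ l, (P i ↔ ¬ Q i) ∧ (Q i → gA i = K - gB i)) →
      l.filterMap (fun i => if P i then none else some (gA i))
        = (l.filterMap (fun i => if Q i then some (gB i) else none)).map (fun c => K - c) := by
  intro l
  induction l with
  | nil => intro _; rfl
  | cons i l ih =>
    intro h
    have hi := h i (List.mem_cons_self)
    have hrest := fun j hj => h j (List.mem_cons_of_mem i hj)
    by_cases hQ : Q i
    · have hP : ¬ P i := by rw [hi.1]; simpa using hQ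
      simp only [List.filterMap_cons, if_neg hP, if_pos hQ, List.map_cons, ih hrest, hi.2 hQ]
    · have hP : P i := by rw [hi.1]; exact hQ
      simp only [List.filterMap_cons, if_pos hP, if_neg hQ, ih hrest]

lemma foldl_max_init : ∀ (l : List Int) (a b : Int), l.foldl max (max a b) = max a (l.foldl max b) := by
  intro l
  induction l with
  | nil => intro a b; rfl
  | cons x l ih =>
    intro a b
    simp only [List.foldl_cons]
    rw [max_assoc, ih]

lemma foldl_min_map_sub : ∀ (rest : List Int) (a K c : Int),
    ((c :: rest).map (fun v => K - v)).foldl min a = min a (K - rest.foldl max c) := by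
  intro rest
  induction rest with
  | nil => intro a K c; rfl
  | cons d rest ih =>
    intro a K c
    have h1 : ((c :: d :: rest).map (fun v => K - v)).foldl min a
        = ((d :: rest).map (fun v => K - v)).foldl min (min a (K - c)) := by
      simp [List.foldl_cons]
    rw [h1, ih]
    have h2 : (d :: rest).foldl max c = rest.foldl max (max c d) := by
      simp [List.foldl_cons]
    rw [h2, foldl_max_init]
    rcases le_total c (rest.foldl max d) with h | h <;>
      rw [max_def, min_def, min_def, min_def] <;> split_ifs <;> omega

lemma pymax_cons : ∀ (rest : List Int) (c : Int),
    PySem.List.max? (c :: rest) (fun y => y) = some (List.foldl max c rest) := by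
  intro rest
  induction rest with
  | nil => intro c; rfl
  | cons d rest ih =>
    intro c
    have h1 : PySem.List.max? (c :: d :: rest) (fun y => y)
        = PySem.List.max? (max c d :: rest) (fun y => y) := by
      simp only [PySem.List.max?, List.foldl_cons]
      congr 1
      show (if c < d then some d else some c) = some (max c d)
      rcases lt_or_ge c d with h | h
      · rw [if_pos h, max_eq_right (le_of_lt h)]
      · rw [if_neg (not_lt.mpr h), max_eq_left h]
    rw [h1, ih]
    simp [List.foldl_cons]
def covP (X valid : Int) (i : Nat) (b : Int) : Bool := (sB X valid b).toNat.testBit i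

lemma main_eq (N : Int) (A : List Int) (X : Int) : count N A X = count_alt N A X := by
  simp only [count, count_alt]
  set L := PySem.Int.bitLength ((PySem.List.max? A (fun y => y)).getD 0) with hL
  set valid := PySem.Int.band (Int.not X) ((1 : Int) <<< L - 1) with hvalid
  have hvnn : 0 ≤ valid := by rw [hvalid]; exact valid_nonneg X L
  have hvbit : ∀ j, valid.toNat.testBit j = (decide (j < L) && !pbit X j) := by
    intro j; rw [hvalid]; exact valid_testBit X L j
  by_cases hv : valid = 0
  · rw [if_pos hv]
    refine foldl_all_skip (fun i => PySem.Int.band ((1 : Int) <<< i) X ≠ 0)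
      (fun i => A.foldl (fun c b =>
        if PySem.Int.band b (if (1 : Int) <<< i < X then X - PySem.Int.mod X ((1 : Int) <<< i) + (1 : Int) <<< i else (1 : Int) <<< i)
            ≠ (if (1 : Int) <<< i < X then X - PySem.Int.mod X ((1 : Int) <<< i) + (1 : Int) <<< i else (1 : Int) <<< i)
          then c + 1 else c) 0) (List.range L) N ?_
    intro i hiL h0
    rw [List.mem_range] at hiL
    have hXi := (skip_test X i).mp h0
    have hbt : valid.toNat.testBit i = true := by rw [hvbit i, hXi]; simp [hiL]
    rw [hv] at hbt
    simp at hbt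
  · rw [if_neg hv]
    rw [transpose_min (fun i => PySem.Int.band ((1 : Int) <<< i) X ≠ 0)
      (fun i => A.foldl (fun c b =>
        if PySem.Int.band b (if (1 : Int) <<< i < X then X - PySem.Int.mod X ((1 : Int) <<< i) + (1 : Int) <<< i else (1 : Int) <<< i)
            ≠ (if (1 : Int) <<< i < X then X - PySem.Int.mod X ((1 : Int) <<< i) + (1 : Int) <<< i else (1 : Int) <<< i)
          then c + 1 else c) 0) (List.range L) N]
    rw [PySem.List.foldl_append_singleton_eq_map (fun b =>
        if 0 < X then
          if PySem.Int.bitLength (PySem.Int.band X (Int.not b)) ≠ 0 then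
            PySem.Int.band (PySem.Int.band b valid) ((-1 : Int) <<< (PySem.Int.bitLength (PySem.Int.band X (Int.not b)) - 1))
          else PySem.Int.band b valid
        else PySem.Int.band b valid) A []]
    rw [List.nil_append]
    have hsB : (fun (b : Int) =>
        if 0 < X then
          if PySem.Int.bitLength (PySem.Int.band X (Int.not b)) ≠ 0 then
            PySem.Int.band (PySem.Int.band b valid) ((-1 : Int) <<< (PySem.Int.bitLength (PySem.Int.band X (Int.not b)) - 1))
          else PySem.Int.band b valid
        else PySem.Int.band b valid) = sB X valid := rfl
    rw [hsB]
    have hcands : (List.range L).filterMap (fun (i : Nat) =>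
        if PySem.Int.band (valid >>> i) (1 : Int) ≠ 0 then
          some ((List.map (sB X valid) A).foldl (fun acc (s : Int) => acc + PySem.Int.band (s >>> i) (1 : Int)) 0)
        else none)
        = (List.range L).filterMap (fun (i : Nat) =>
          if valid.toNat.testBit i = true then some ((A.countP (covP X valid i) : Int)) else none) := by
      apply List.filterMap_congr
      intro i hiL
      have hcond : (PySem.Int.band (valid >>> i) (1 : Int) ≠ 0) ↔ (valid.toNat.testBit i = true) := by
        rw [band_shr_one valid hvnn i]
        cases h : valid.toNat.testBit i <;> simp
      have hval : (List.map (sB X valid) A).foldl (fun acc (s : Int) => acc + PySem.Int.band (s >>> i) (1 : Int)) 0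
          = ((A.countP (covP X valid i) : Int)) := by
        rw [PySem.List.foldl_add, zero_add, List.map_map]
        have hmap : A.map ((fun (s : Int) => PySem.Int.band (s >>> i) (1 : Int)) ∘ sB X valid)
            = A.map (fun b => if covP X valid i b = true then 1 else 0) := by
          apply List.map_congr_left
          intro b _
          show PySem.Int.band ((sB X valid b) >>> i) (1 : Int) = _
          rw [band_shr_one (sB X valid b) (by rw [hvalid]; exact sB_nonneg X L b) i]
          rfl
        rw [hmap, PySem.List.sum_map_ite_one_zero]
      rw [if_congr hcond rfl rfl, hval]
    rw [hcands]
    have hrel : (List.range L).filterMap (fun (i : Nat) =>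
        if PySem.Int.band ((1 : Int) <<< i) X ≠ 0 then none
        else some (A.foldl (fun c b =>
          if PySem.Int.band b (if (1 : Int) <<< i < X then X - PySem.Int.mod X ((1 : Int) <<< i) + (1 : Int) <<< i else (1 : Int) <<< i)
              ≠ (if (1 : Int) <<< i < X then X - PySem.Int.mod X ((1 : Int) <<< i) + (1 : Int) <<< i else (1 : Int) <<< i)
            then c + 1 else c) 0))
        = ((List.range L).filterMap (fun (i : Nat) =>
          if valid.toNat.testBit i = true then some ((A.countP (covP X valid i) : Int)) else none)).map
            (fun c => (A.length : Int) - c) := by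
      apply filterMap_rel
      intro i hiL
      rw [List.mem_range] at hiL
      constructor
      · rw [hvbit i]
        cases hXi : pbit X i
        · simp [hiL, hXi, skip_test]
        · have : PySem.Int.band ((1 : Int) <<< i) X ≠ 0 := by
            intro h0; rw [(skip_test X i).mp h0] at hXi; exact Bool.false_ne_true hXi
          simp [hiL, this]
      · intro hQ
        have hXi : pbit X i = false := by
          rw [hvbit i] at hQ
          cases h : pbit X i
          · rfl
          · rw [h] at hQ; simp at hQ
        have hmask : (if (1 : Int) <<< i < X then X - PySem.Int.mod X ((1 : Int) <<< i) + (1 : Int) <<< i else (1 : Int) <<< i) = mA X i := rfl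
        rw [hmask]
        have hcnt : (fun (c : Int) (b : Int) => if PySem.Int.band b (mA X i) ≠ mA X i then c + 1 else c)
            = (fun c b => if (fun b => !covP X valid i b) b = true then c + 1 else c) := by
          funext c b
          have h1 := covA_iff X b i hXi
          have h2 : ((sB X valid b).toNat.testBit i = true) ↔ Cov X b i := by
            rw [hvalid]; exact sB_testBit X L b i hiL hXi
          by_cases hcov : Cov X b i
          · rw [if_neg (show ¬ PySem.Int.band b (mA X i) ≠ mA X i from fun h => h (h1.mpr hcov)),
              if_neg (by show ¬ ((!covP X valid i b) = true); rw [show covP X valid i b = true from h2.mpr hcov]; simp)]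
          · rw [if_pos (show PySem.Int.band b (mA X i) ≠ mA X i from fun h => hcov (h1.mp h)),
              if_pos (by show (!covP X valid i b) = true; rw [show covP X valid i b = false from by
                cases h : covP X valid i b
                · rfl
                · exact absurd (h2.mp h) hcov]; rfl)]
        rw [hcnt, PySem.List.foldl_count_if, zero_add]
        have hsplit : A.length = A.countP (covP X valid i) + A.countP (fun b => !covP X valid i b) := by
          rw [List.length_eq_countP_add_countP (covP X valid i) (l := A)]
          congr 1
          apply List.countP_congr
          intro b _
          cases h : covP X valid i b <;> simp
        have hle : A.countP (covP X valid i) ≤ A.length := List.countP_le_length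
        have hsub : A.countP (fun b => !covP X valid i b) = A.length - A.countP (covP X valid i) := by omega
        rw [hsub]
        have hcast : ((A.length - A.countP (covP X valid i) : Nat) : Int)
            = (A.length : Int) - (A.countP (covP X valid i) : Int) := by
          push_cast [hle]; ring
        rw [hcast]
    rw [hrel]
    have hne : ∃ j, valid.toNat.testBit j = true := by
      apply Nat.exists_testBit_of_ne_zero
      omega
    obtain ⟨j, hj⟩ := hne
    have hjL : j < L := by
      rw [hvbit j] at hj
      cases h : decide (j < L)
      · rw [h] at hj; simp at hj
      · simpa using h
    have hmem : ((A.countP (covP X valid j) : Int)) ∈ (List.range L).filterMap (fun (i : Nat) =>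
        if valid.toNat.testBit i = true then some ((A.countP (covP X valid i) : Int)) else none) := by
      rw [List.mem_filterMap]
      exact ⟨j, List.mem_range.mpr hjL, by rw [if_pos hj]⟩
    rcases hLB : (List.range L).filterMap (fun (i : Nat) =>
        if valid.toNat.testBit i = true then some ((A.countP (covP X valid i) : Int)) else none) with _ | ⟨c, rest⟩
    · rw [hLB] at hmem; simp at hmem
    · rw [foldl_min_map_sub, pymax_cons, Option.getD_some, PySem.List.len_eq]

-- ===== VERDICT (by name: the statement is the Claim_ definition above) =====
theorem count_spec : Claim_equal_count := by
  intro N A X _ _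
  unfold Spec_count
  exact main_eq N A X
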